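-- pv_equiv track=rewrite | github.com/pypi-data/pypi-mirror-378 | packages/qupepfold/qupepfold-0.5.0-py3-none-any.whl/qupepfold/qupepfold.py | _detect_ss_records
-- ===== SOURCE A (Python) =====
-- def _detect_ss_records(ss, seq):
--     helices, sheets = [], []
--     n = len(ss)
--     i = 0
--     while i < n:
--         if ss[i] == "H":
--             j = i
--             while j < n and ss[j] == "H":
--                 j += 1
--             if j - i >= 4:
--                 helices.append((i + 1, j))
--             i = j
--         else:
--             i += 1
--     i = 0
--     while i < n:
--         if ss[i] == "E":
--             j = i
--             while j < n and ss[j] == "E":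
--                 j += 1
--             if j - i >= 3:
--                 sheets.append((i + 1, j))
--             i = j
--         else:
--             i += 1
--     return helices, sheets
-- ===== SOURCE B (Python) =====
-- def _detect_ss_records(ss, seq):
--     helices, sheets = [], []
--
--     def flush(cur, start, length):
--         if cur == 'H' and length >= 4:
--             helices.append((start + 1, start + length))
--         elif cur == 'E' and length >= 3:
--             sheets.append((start + 1, start + length))
--
--     pos, cur, start, length = 0, None, 0, 0
--     for ch in ss:
--         if ch == cur:
--             length += 1
--         else:
--             flush(cur, start, length)
--             cur, start, length = ch, pos, 1
--         pos += 1
--     flush(cur, start, length)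
--     return helices, sheets
-- ===== Notes on version B (the rewrite author's own statement) =====
-- stated objective: simpler
-- what changed: A makes two separate index-based scans of ss (one for H, one for E), each with a nested while rescanning the run; B makes one for-loop over the characters, carrying the current run (char, start, length) as state and classifying each run into helices or sheets the moment it ends (one pass and no per-run rescans instead of two indexed scans).
import Mathlib
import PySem

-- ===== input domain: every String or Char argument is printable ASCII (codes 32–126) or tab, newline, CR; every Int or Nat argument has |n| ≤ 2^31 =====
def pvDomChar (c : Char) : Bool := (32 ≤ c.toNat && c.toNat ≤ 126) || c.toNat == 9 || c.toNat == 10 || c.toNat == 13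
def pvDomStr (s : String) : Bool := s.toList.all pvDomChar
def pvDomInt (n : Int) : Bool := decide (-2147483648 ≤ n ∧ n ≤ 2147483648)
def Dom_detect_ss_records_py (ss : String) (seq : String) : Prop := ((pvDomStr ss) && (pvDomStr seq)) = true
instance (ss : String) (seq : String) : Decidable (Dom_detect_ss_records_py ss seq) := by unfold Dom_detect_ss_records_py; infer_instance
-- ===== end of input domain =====

-- B replaces A's two index-based scans (each with a nested run-rescanning while) by one
-- pass over the characters carrying the current run as state; objective: simpler, same O(n) cost.

-- ===== PORT A =====
-- inner 'while j < n and ss[j] == c: j += 1' as a count of the leading run of c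
def pvRun (c : Char) : List Char → Nat
  | [] => 0
  | x :: xs => if x = c then pvRun c xs + 1 else 0

-- A's outer while loop (used twice, with c = 'H', m = 4 and c = 'E', m = 3)
def pvScan (c : Char) (m : Nat) : List Char → Nat → List (Int × Int)
  | [], _ => []
  | x :: rest, i =>
    if x = c then
      let r := pvRun c rest
      let tail := pvScan c m (rest.drop r) (i + r + 1)
      if m ≤ r + 1 then ((i : Int) + 1, (i : Int) + (r : Int) + 1) :: tail else tail
    else pvScan c m rest (i + 1)
  termination_by l _ => l.length
  decreasing_by
  all_goals simp [List.length_drop]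

def detect_ss_records_py (ss : String) (seq : String) : (List (Int × Int)) × (List (Int × Int)) :=
  (pvScan 'H' 4 ss.toList 0, pvScan 'E' 3 ss.toList 0)

-- ===== PORT B =====
-- B's flush(cur, start, length): emit the finished run, if any, to the right list
def pvFlush (cur : Option Char) (start len : Nat) (h s : List (Int × Int)) :
    (List (Int × Int)) × (List (Int × Int)) :=
  if cur = some 'H' ∧ 4 ≤ len then (h ++ [((start : Int) + 1, (start : Int) + (len : Int))], s)
  else if cur = some 'E' ∧ 3 ≤ len then (h, s ++ [((start : Int) + 1, (start : Int) + (len : Int))])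
  else (h, s)

-- B's loop body; state = (pos, cur, start, length, helices, sheets)
def pvStep (st : Nat × Option Char × Nat × Nat × List (Int × Int) × List (Int × Int)) (ch : Char) :
    Nat × Option Char × Nat × Nat × List (Int × Int) × List (Int × Int) :=
  let (pos, cur, start, len, h, s) := st
  if some ch = cur then (pos + 1, cur, start, len + 1, h, s)
  else
    let (h', s') := pvFlush cur start len h s
    (pos + 1, some ch, pos, 1, h', s')

def detect_ss_records_py_alt (ss : String) (seq : String) : (List (Int × Int)) × (List (Int × Int)) :=
  let st := ss.toList.foldl pvStep (0, none, 0, 0, [], [])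
  pvFlush st.2.1 st.2.2.1 st.2.2.2.1 st.2.2.2.2.1 st.2.2.2.2.2

-- ===== PRECONDITION & SPEC =====
def Spec_detect_ss_records_py (ss : String) (seq : String) (out : (List (Int × Int)) × (List (Int × Int))) : Prop := out = detect_ss_records_py_alt ss seq
instance (ss : String) (seq : String) (out : (List (Int × Int)) × (List (Int × Int))) : Decidable (Spec_detect_ss_records_py ss seq out) := by unfold Spec_detect_ss_records_py; infer_instance

-- ===== CLAIM (what is proved, stated in full; the proofs are below) =====
def Claim_equal_detect_ss_records_py : Prop := ∀ (ss : String) (seq : String), Dom_detect_ss_records_py ss seq → Spec_detect_ss_records_py ss seq (detect_ss_records_py ss seq)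

-- ===== LEMMAS AND PROOFS =====

theorem pvScan_nil (c : Char) (m : Nat) (i : Nat) : pvScan c m [] i = [] := by rw [pvScan]

theorem pvScan_cons (c : Char) (m : Nat) (x : Char) (rest : List Char) (i : Nat) :
    pvScan c m (x :: rest) i =
      if x = c then
        (if m ≤ pvRun c rest + 1
          then ((i : Int) + 1, (i : Int) + (pvRun c rest : Int) + 1)
            :: pvScan c m (rest.drop (pvRun c rest)) (i + pvRun c rest + 1)
          else pvScan c m (rest.drop (pvRun c rest)) (i + pvRun c rest + 1))
      else pvScan c m rest (i + 1) := by rw [pvScan]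

theorem pvRun_le (c : Char) (l : List Char) : pvRun c l ≤ l.length := by
  induction l with
  | nil => simp [pvRun]
  | cons x xs ih => simp only [pvRun]; split <;> simp <;> omega

theorem pvRun_take (c : Char) (l : List Char) :
    ∀ y ∈ l.take (pvRun c l), y = c := by
  induction l with
  | nil => simp
  | cons x xs ih =>
    simp only [pvRun]
    split
    · rename_i hx
      intro y hy
      simp only [List.take_succ_cons, List.mem_cons] at hy
      rcases hy with rfl | hy
      · exact hx
      · exact ih y hy
    · simp

theorem pvRun_drop_head (c : Char) (l : List Char) (y : Char) (r : List Char)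
    (h : l.drop (pvRun c l) = y :: r) : y ≠ c := by
  induction l with
  | nil => simp at h
  | cons x xs ih =>
    simp only [pvRun] at h
    by_cases hx : x = c
    · simp [hx] at h; exact ih h
    · simp [hx] at h; rw [← h.1]; exact hx

-- A-side characterisation: pvScan consumes the whole leading run of x :: rest at once
theorem pvScan_run (c : Char) (m : Nat) (x : Char) (rest : List Char) (p : Nat) :
    pvScan c m (x :: rest) p =
      (if x = c ∧ m ≤ pvRun x rest + 1
        then [((p : Int) + 1, (p : Int) + (pvRun x rest : Int) + 1)] else [])
      ++ pvScan c m (rest.drop (pvRun x rest)) (p + pvRun x rest + 1) := by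
  by_cases hx : x = c
  · subst hx
    rw [pvScan_cons, if_pos rfl]
    by_cases hm2 : m ≤ pvRun x rest + 1 <;> simp [hm2]
  · rw [if_neg (by simp [hx]), pvScan_cons, if_neg hx, List.nil_append]
    -- step through the run of x's one character at a time, as A does
    have key : ∀ (pre l' : List Char) (q : Nat), (∀ y ∈ pre, y ≠ c) →
        pvScan c m (pre ++ l') q = pvScan c m l' (q + pre.length) := by
      intro pre
      induction pre with
      | nil => simp
      | cons z zs ih =>
        intro l' q hpre
        have hz : z ≠ c := hpre z (by simp)
        rw [List.cons_append, pvScan_cons, if_neg hz]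
        rw [ih l' (q + 1) (fun y hy => hpre y (by simp [hy]))]
        congr 1
        simp only [List.length_cons]
        omega
    have hkey := key (rest.take (pvRun x rest)) (rest.drop (pvRun x rest)) (p + 1)
      (fun y hy => by rw [pvRun_take x rest y hy]; exact hx)
    rw [List.take_append_drop] at hkey
    have hle : pvRun x rest ≤ rest.length := pvRun_le x rest
    have hlen : (rest.take (pvRun x rest)).length = pvRun x rest := by
      simp [List.length_take]; omega
    rw [hlen] at hkey
    rw [hkey]
    congr 1
    omega

-- B-side: folding over a run of c's just extends the current run
theorem foldl_run (c : Char) (run : List Char) (hrun : ∀ y ∈ run, y = c) :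
    ∀ (p st len : Nat) (h s : List (Int × Int)),
      List.foldl pvStep (p, some c, st, len, h, s) run
        = (p + run.length, some c, st, len + run.length, h, s) := by
  induction run with
  | nil => simp
  | cons x xs ih =>
    intro p st len h s
    have hx : x = c := hrun x (by simp)
    subst hx
    rw [List.foldl_cons, show pvStep (p, some x, st, len, h, s) x
        = (p + 1, some x, st, len + 1, h, s) by simp [pvStep]]
    rw [ih (fun y hy => hrun y (by simp [hy]))]
    simp only [List.length_cons]
    rw [show p + 1 + xs.length = p + (xs.length + 1) by omega,
        show len + 1 + xs.length = len + (xs.length + 1) by omega]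

-- what B's flush emits for a finished run of x of length 1 + j starting at p
theorem pvFlush_run (x : Char) (p j : Nat) (h s : List (Int × Int)) :
    pvFlush (some x) p (1 + j) h s =
      (h ++ (if x = 'H' ∧ 4 ≤ j + 1
          then [((p : Int) + 1, (p : Int) + (j : Int) + 1)] else []),
       s ++ (if x = 'E' ∧ 3 ≤ j + 1
          then [((p : Int) + 1, (p : Int) + (j : Int) + 1)] else [])) := by
  have hc : ((1 + j : Nat) : Int) = (j : Int) + 1 := by push_cast; ring
  simp only [pvFlush, Option.some.injEq, hc]
  split_ifs with h1 h2 h3 h4 h5 <;> simp_all <;> try omega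

-- the main invariant: B's fold started in "no current run" state computes A's two scans
theorem main_inv (n : Nat) : ∀ (l : List Char), l.length ≤ n → ∀ (p : Nat) (h s : List (Int × Int)),
    (let st := List.foldl pvStep (p, none, 0, 0, h, s) l
     pvFlush st.2.1 st.2.2.1 st.2.2.2.1 st.2.2.2.2.1 st.2.2.2.2.2)
      = (h ++ pvScan 'H' 4 l p, s ++ pvScan 'E' 3 l p) := by
  induction n with
  | zero =>
    intro l hl p h s
    have : l = [] := List.eq_nil_of_length_eq_zero (by omega)
    subst this
    simp [pvScan_nil, pvFlush]
  | succ n ih =>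
    intro l hl p h s
    cases l with
    | nil => simp [pvScan_nil, pvFlush]
    | cons x rest =>
      simp only []
      -- first step: start a run at position p (flush of the empty none-run is a no-op)
      have step0 : pvStep (p, none, 0, 0, h, s) x = (p + 1, some x, p, 1, h, s) := by
        simp [pvStep, pvFlush]
      rw [List.foldl_cons, step0]
      set j := pvRun x rest with hj
      have hdecomp : rest = rest.take j ++ rest.drop j := (List.take_append_drop j rest).symm
      have hjle : j ≤ rest.length := hj ▸ pvRun_le x rest
      have hlen : (rest.take j).length = j := by simp [List.length_take]; omega
      have htake : ∀ y ∈ rest.take j, y = x := by rw [hj]; exact pvRun_take x rest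
      conv_lhs => rw [hdecomp]
      rw [List.foldl_append, foldl_run x (rest.take j) htake, hlen]
      have hA : ∀ (c : Char) (m : Nat),
          pvScan c m (x :: rest) p =
            (if x = c ∧ m ≤ j + 1 then [((p : Int) + 1, (p : Int) + (j : Int) + 1)] else [])
            ++ pvScan c m (rest.drop j) (p + j + 1) := by
        intro c m; rw [hj]; exact pvScan_run c m x rest p
      cases hrest : rest.drop j with
      | nil =>
        rw [List.foldl_nil, hA 'H' 4, hA 'E' 3, hrest]
        simpa [pvScan_nil] using pvFlush_run x p j h s
      | cons x' r2 =>
        have hx' : x' ≠ x := pvRun_drop_head x rest x' r2 (hj ▸ hrest)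
        have step1 : pvStep (p + 1 + j, some x, p, 1 + j, h, s) x' =
            (p + 1 + j + 1, some x', p + 1 + j, 1,
             (pvFlush (some x) p (1 + j) h s).1, (pvFlush (some x) p (1 + j) h s).2) := by
          simp [pvStep, hx']
        rw [List.foldl_cons, step1]
        -- continuing from a fresh run at x' is the same as restarting from the none state
        have restart : ∀ (q : Nat) (h1 s1 : List (Int × Int)),
            List.foldl pvStep (q + 1, some x', q, 1, h1, s1) r2
              = List.foldl pvStep (q, none, 0, 0, h1, s1) (x' :: r2) := by
          intro q h1 s1
          rw [List.foldl_cons]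
          congr 1
        rw [restart]
        have hlen2 : (x' :: r2).length ≤ n := by
          have hd : (rest.drop j).length = rest.length - j := List.length_drop
          rw [hrest] at hd
          simp only [List.length_cons] at hd hl ⊢
          omega
        have := ih (x' :: r2) hlen2 (p + 1 + j)
          (pvFlush (some x) p (1 + j) h s).1 (pvFlush (some x) p (1 + j) h s).2
        simp only [] at this
        rw [this, hA 'H' 4, hA 'E' 3, hrest, pvFlush_run x p j h s]
        have harith : p + j + 1 = p + 1 + j := by omega
        simp [List.append_assoc, harith]

-- ===== VERDICT (by name: the statement is the Claim_ definition above) =====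
theorem detect_ss_records_py_spec : Claim_equal_detect_ss_records_py := by
  intro ss seq _
  show detect_ss_records_py ss seq = detect_ss_records_py_alt ss seq
  unfold detect_ss_records_py detect_ss_records_py_alt
  have := main_inv ss.toList.length ss.toList le_rfl 0 [] []
  simp only [List.nil_append] at this
  exact this.symm
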